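-- pv_equiv track=rewrite | github.com/nigiwai/tfvars2excel | 3_excel2map.py | _merge_object_definitions
-- ===== SOURCE A (Python) =====
-- from typing import Any, Dict, List, Optional, Tuple, Union
--
-- def _merge_object_definitions(headers: List[str], column_types: List[str],
--                               object_type_defs: Dict[int, Dict[str, str]]
--                               ) -> Dict[str, Dict[str, str]]:
--     """
--     重複するヘッダーのオブジェクト定義をマージする。
--
--     引数:
--         headers: 列ヘッダーのリスト
--         column_types: 列の型のリスト
--         object_type_defs: オブジェクト型定義の辞書
--
--     戻り値:
--         マージされたオブジェクト定義辞書
--     """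
--     merged_object_defs: Dict[str, Dict[str, str]] = {}
--     for i in range(len(headers)):
--         if column_types[i] in ["map(object)", "object", "list(object)"]:
--             key = headers[i]
--             current_def = object_type_defs.get(i, {})
--             if key in merged_object_defs:
--                 merged_object_defs[key].update(current_def)
--             else:
--                 merged_object_defs[key] = current_def
--     return merged_object_defs
-- ===== SOURCE B (Python) =====
-- from typing import Dict, List
--
--
-- def _merge_object_definitions(headers: List[str], column_types: List[str],
--                               object_type_defs: Dict[int, Dict[str, str]]
--                               ) -> Dict[str, Dict[str, str]]:
--     object_types = {"map(object)", "object", "list(object)"}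
--     indices_by_header: Dict[str, List[int]] = {}
--     for i, col_type in enumerate(column_types[:len(headers)]):
--         if col_type in object_types:
--             indices_by_header.setdefault(headers[i], []).append(i)
--     merged: Dict[str, Dict[str, str]] = {}
--     for key, idxs in indices_by_header.items():
--         base = object_type_defs.get(idxs[0], {})
--         for i in idxs[1:]:
--             base.update(object_type_defs.get(i, {}))
--         merged[key] = base
--     return merged
-- ===== Notes on version B (the rewrite author's own statement) =====
-- stated objective: alternative
-- what changed: Replaces A's inline single-pass merge with a two-pass decomposition: first group the object-typed column indices by header, then merge each group's definitions left to right.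
import Mathlib
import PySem

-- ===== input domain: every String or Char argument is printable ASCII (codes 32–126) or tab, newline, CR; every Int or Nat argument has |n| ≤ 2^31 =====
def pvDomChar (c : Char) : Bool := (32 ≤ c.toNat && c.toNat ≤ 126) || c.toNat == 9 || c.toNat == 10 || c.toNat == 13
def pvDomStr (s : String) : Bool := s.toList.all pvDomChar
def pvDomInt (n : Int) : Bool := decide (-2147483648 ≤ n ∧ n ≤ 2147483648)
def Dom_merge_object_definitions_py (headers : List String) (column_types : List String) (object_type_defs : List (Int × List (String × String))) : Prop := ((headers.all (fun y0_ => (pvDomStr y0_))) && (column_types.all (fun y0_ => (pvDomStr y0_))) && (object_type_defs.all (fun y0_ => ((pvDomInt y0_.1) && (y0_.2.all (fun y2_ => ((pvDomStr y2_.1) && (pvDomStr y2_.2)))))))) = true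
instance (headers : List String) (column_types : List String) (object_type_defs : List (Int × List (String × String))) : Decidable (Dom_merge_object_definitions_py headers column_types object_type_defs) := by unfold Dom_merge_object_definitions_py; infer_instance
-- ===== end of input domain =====

-- B merges by a two-pass index-grouping decomposition instead of A's inline single-pass merge; equivalence is about the
-- return value (both programs mutate the first matching inner dict of object_type_defs in place via dict.update).

-- ===== PORT A =====
-- object_type_defs.get(i, {}) : first-match lookup in the association list, {} when absent (shared by both ports,
-- both Pythons call the identical expression)
def pvGetDef (object_type_defs : List (Int × List (String × String))) (i : Int) : PySem.Dict String String :=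
  PySem.Dict.mk (((PySem.Dict.mk object_type_defs).get? i).getD [])

def merge_object_definitions_py (headers : List String) (column_types : List String) (object_type_defs : List (Int × List (String × String))) : List (String × List (String × String)) :=
  let merged := (PySem.List.pyRange 0 (headers.length : Int)).foldl
    (fun (m : PySem.Dict String (PySem.Dict String String)) i =>
      if (["map(object)", "object", "list(object)"] : List String).contains (PySem.List.pyGetD column_types i "") then
        let key := PySem.List.pyGetD headers i ""
        let current_def := pvGetDef object_type_defs i
        if m.contains key then
          -- merged[key].update(current_def): in-place update, position of the key is kept
          m.insert key ((m.getD key PySem.Dict.empty).update current_def.items)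
        else
          m.insert key current_def
      else m)
    PySem.Dict.empty
  merged.items.map (fun p => (p.1, p.2.items))

-- ===== PORT B =====
def merge_object_definitions_py_alt (headers : List String) (column_types : List String) (object_type_defs : List (Int × List (String × String))) : List (String × List (String × String)) :=
  let object_types : PySem.Set String := PySem.Set.ofList ["map(object)", "object", "list(object)"]
  -- first pass: indices_by_header[headers[i]] = list of object-typed column indices, in encounter order
  let indices_by_header := (PySem.List.enumerate (PySem.List.slice column_types none (some (headers.length : Int)))).foldl
    (fun (d : PySem.Dict String (List Int)) p =>
      if object_types.contains p.2 then
        d.modify (PySem.List.pyGetD headers p.1 "") [] (fun l => l ++ [p.1])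
      else d)
    PySem.Dict.empty
  -- second pass: base = defs of the first index, then update with the defs of the remaining indices in order
  let merged := indices_by_header.items.foldl
    (fun (m : PySem.Dict String (PySem.Dict String String)) q =>
      let base := pvGetDef object_type_defs (PySem.List.pyGetD q.2 0 0)
      let merged_base := (PySem.List.slice q.2 (some 1)).foldl (fun b j => b.update (pvGetDef object_type_defs j).items) base
      m.insert q.1 merged_base)
    PySem.Dict.empty
  merged.items.map (fun p => (p.1, p.2.items))

-- ===== PRECONDITION & SPEC =====
-- A indexes column_types[i] for every i < len(headers): Pre_ excludes exactly the inputs where that raises IndexError.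
def Pre_merge_object_definitions_py (headers : List String) (column_types : List String) (object_type_defs : List (Int × List (String × String))) : Prop :=
  headers.length ≤ column_types.length
instance (headers : List String) (column_types : List String) (object_type_defs : List (Int × List (String × String))) : Decidable (Pre_merge_object_definitions_py headers column_types object_type_defs) := by unfold Pre_merge_object_definitions_py; infer_instance

def pvWitness_merge_object_definitions_py : List String × List String × (List (Int × List (String × String))) :=
  (["h", "h", "g"], ["object", "map(object)", "object"], [(0, [("a", "1")]), (1, [("b", "2")]), (2, [("a", "3")])])

def Spec_merge_object_definitions_py (headers : List String) (column_types : List String) (object_type_defs : List (Int × List (String × String))) (out : List (String × List (String × String))) : Prop := out = merge_object_definitions_py_alt headers column_types object_type_defs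
instance (headers : List String) (column_types : List String) (object_type_defs : List (Int × List (String × String))) (out : List (String × List (String × String))) : Decidable (Spec_merge_object_definitions_py headers column_types object_type_defs out) := by unfold Spec_merge_object_definitions_py; infer_instance

-- ===== CLAIM (what is proved, stated in full; the proofs are below) =====
def Claim_equal_merge_object_definitions_py : Prop := ∀ (headers : List String) (column_types : List String) (object_type_defs : List (Int × List (String × String))), Dom_merge_object_definitions_py headers column_types object_type_defs → Pre_merge_object_definitions_py headers column_types object_type_defs → Spec_merge_object_definitions_py headers column_types object_type_defs (merge_object_definitions_py headers column_types object_type_defs)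

-- ===== LEMMAS AND PROOFS =====

-- A's loop body, as a function of the pair (index, column type)
def pvStepA (headers : List String) (otd : List (Int × List (String × String))) (m : PySem.Dict String (PySem.Dict String String)) (p : Int × String) : PySem.Dict String (PySem.Dict String String) :=
  if (["map(object)", "object", "list(object)"] : List String).contains p.2 then
    let key := PySem.List.pyGetD headers p.1 ""
    if m.contains key then
      m.insert key ((m.getD key PySem.Dict.empty).update (pvGetDef otd p.1).items)
    else
      m.insert key (pvGetDef otd p.1)
  else m

-- B's first-pass loop body
def pvStepB (headers : List String) (d : PySem.Dict String (List Int)) (p : Int × String) : PySem.Dict String (List Int) :=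
  if (["map(object)", "object", "list(object)"] : List String).contains p.2 then
    d.modify (PySem.List.pyGetD headers p.1 "") [] (fun l => l ++ [p.1])
  else d

-- B's second-pass merge of one index group
def pvMval (otd : List (Int × List (String × String))) (idxs : List Int) : PySem.Dict String String :=
  (PySem.List.slice idxs (some 1)).foldl (fun b j => b.update (pvGetDef otd j).items) (pvGetDef otd (PySem.List.pyGetD idxs 0 0))

-- B's result dict, as a function of the index groups
def pvRender (otd : List (Int × List (String × String))) (g : PySem.Dict String (List Int)) : PySem.Dict String (PySem.Dict String String) :=
  PySem.Dict.mk (g.items.map (fun p => (p.1, pvMval otd p.2)))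

lemma pvMval_append (otd : List (Int × List (String × String))) (idxs : List Int) (i : Int) (h : idxs ≠ []) :
    pvMval otd (idxs ++ [i]) = (pvMval otd idxs).update (pvGetDef otd i).items := by
  cases idxs with
  | nil => exact absurd rfl h
  | cons a t =>
    unfold pvMval; rw [PySem.List.slice_from_one, PySem.List.slice_from_one]; simp [pysem, List.foldl_append]

lemma pvMval_single (otd : List (Int × List (String × String))) (i : Int) :
    pvMval otd [i] = pvGetDef otd i := by
  unfold pvMval; rw [PySem.List.slice_from_one]; simp [pysem]

lemma pvKeys_render (otd : List (Int × List (String × String))) (g : PySem.Dict String (List Int)) :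
    (pvRender otd g).keys = g.keys := by
  simp [pvRender, PySem.Dict.keys, List.map_map]

lemma pvContains_render (otd : List (Int × List (String × String))) (g : PySem.Dict String (List Int)) (k : String) :
    (pvRender otd g).contains k = g.contains k := by
  rw [PySem.Dict.contains_eq_decide_mem_keys, PySem.Dict.contains_eq_decide_mem_keys, pvKeys_render]

lemma pvStep_commute (headers : List String) (otd : List (Int × List (String × String)))
    (g : PySem.Dict String (List Int)) (p : Int × String)
    (hnd : g.keys.Nodup) (hne : ∀ q ∈ g.items, q.2 ≠ []) :
    pvStepA headers otd (pvRender otd g) p = pvRender otd (pvStepB headers g p) := by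
  unfold pvStepA pvStepB
  by_cases hg : (["map(object)", "object", "list(object)"] : List String).contains p.2 = true
  case neg => rw [if_neg hg, if_neg hg]
  rw [if_pos hg, if_pos hg]
  set k := PySem.List.pyGetD headers p.1 "" with hk
  by_cases hc : g.contains k = true
  case pos =>
    -- the entry with key k
    have hkmem : k ∈ g.keys := (PySem.Dict.contains_iff_mem_keys g k).mp hc
    have : ∃ v, (k, v) ∈ g.items := by
      unfold PySem.Dict.keys at hkmem
      obtain ⟨q0, hq0, hq0k⟩ := List.mem_map.mp hkmem
      exact ⟨q0.2, by rwa [show (k, q0.2) = q0 from by rw [← hq0k]]⟩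
    obtain ⟨v0, hv0⟩ := this
    have hv0ne : v0 ≠ [] := hne (k, v0) hv0
    have hgetg : g.getD k [] = v0 := PySem.Dict.getD_of_mem_items g hv0 hnd []
    have hrmem : (k, pvMval otd v0) ∈ (pvRender otd g).items := by
      simp only [pvRender]
      exact List.mem_map.mpr ⟨(k, v0), hv0, rfl⟩
    have hrnd : (pvRender otd g).keys.Nodup := by rw [pvKeys_render]; exact hnd
    have hgetr : (pvRender otd g).getD k PySem.Dict.empty = pvMval otd v0 :=
      PySem.Dict.getD_of_mem_items _ hrmem hrnd _
    have hcr : (pvRender otd g).contains k = true := by rw [pvContains_render]; exact hc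
    rw [if_pos hcr, hgetr, ← pvMval_append otd v0 p.1 hv0ne]
    -- both sides via items
    apply PySem.Dict.ext
    rw [PySem.Dict.items_insert_of_contains _ _ hcr]
    simp only [pvRender, PySem.Dict.modify, hgetg,
      PySem.Dict.items_insert_of_contains _ _ hc]
    rw [List.map_map, List.map_map]
    apply List.map_congr_left
    intro q hq
    by_cases hqk : (q.1 == k) = true
    · simp [Function.comp, hqk]
    · simp [Function.comp, hqk]
  case neg =>
    have hcr : (pvRender otd g).contains k = false := by rw [pvContains_render]; simpa using hc
    have hgetg : g.getD k [] = [] := PySem.Dict.getD_of_not_contains g [] (by simpa using hc)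
    rw [if_neg (by simp [hcr])]
    apply PySem.Dict.ext
    rw [PySem.Dict.items_insert_of_not_contains _ _ hcr]
    simp only [pvRender, PySem.Dict.modify, hgetg,
      PySem.Dict.items_insert_of_not_contains _ _ (by simpa using hc)]
    simp [pvMval_single]

lemma pvStepB_nodup (headers : List String) (g : PySem.Dict String (List Int)) (p : Int × String)
    (hnd : g.keys.Nodup) : (pvStepB headers g p).keys.Nodup := by
  unfold pvStepB
  split
  · rw [PySem.Dict.keys_modify]
    exact PySem.Dict.nodup_keys_insert _ _ _ hnd
  · exact hnd

lemma pvStepB_nonnil (headers : List String) (g : PySem.Dict String (List Int)) (p : Int × String)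
    (hne : ∀ q ∈ g.items, q.2 ≠ []) : ∀ q ∈ (pvStepB headers g p).items, q.2 ≠ [] := by
  unfold pvStepB
  split
  · intro q hq
    rw [PySem.Dict.modify] at hq
    rcases (PySem.Dict.mem_items_insert _ _ _ q).mp hq with h | ⟨h, _⟩
    · rw [h]; simp
    · exact hne q h
  · exact hne

lemma pvFoldB_nodup (headers : List String) (pairs : List (Int × String)) :
    ∀ (g : PySem.Dict String (List Int)), g.keys.Nodup → (pairs.foldl (pvStepB headers) g).keys.Nodup := by
  induction pairs with
  | nil => intro g h; exact h
  | cons p rest ih => intro g h; exact ih _ (pvStepB_nodup headers g p h)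

lemma pvFoldB_nonnil (headers : List String) (pairs : List (Int × String)) :
    ∀ (g : PySem.Dict String (List Int)), (∀ q ∈ g.items, q.2 ≠ []) →
    ∀ q ∈ (pairs.foldl (pvStepB headers) g).items, q.2 ≠ [] := by
  induction pairs with
  | nil => intro g h; exact h
  | cons p rest ih => intro g h; exact ih _ (pvStepB_nonnil headers g p h)

lemma pvMain (headers : List String) (otd : List (Int × List (String × String)))
    (pairs : List (Int × String)) :
    ∀ (g : PySem.Dict String (List Int)), g.keys.Nodup → (∀ q ∈ g.items, q.2 ≠ []) →
    pairs.foldl (pvStepA headers otd) (pvRender otd g) = pvRender otd (pairs.foldl (pvStepB headers) g) := by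
  induction pairs with
  | nil => intro g _ _; rfl
  | cons p rest ih =>
    intro g hnd hne
    simp only [List.foldl_cons]
    rw [pvStep_commute headers otd g p hnd hne]
    exact ih _ (pvStepB_nodup headers g p hnd) (pvStepB_nonnil headers g p hne)

lemma pv_mem_enumerate {α : Type} (xs : List α) :
    ∀ (s : Int) (p : Int × α), p ∈ PySem.List.enumerate xs s →
    ∃ j : Nat, j < xs.length ∧ p.1 = s + (j : Int) ∧ xs[j]? = some p.2 := by
  induction xs with
  | nil => intro s p h; rw [PySem.List.enumerate_nil] at h; cases h
  | cons x t ih =>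
    intro s p h
    rw [PySem.List.enumerate_cons] at h
    rcases List.mem_cons.mp h with h | h
    · exact ⟨0, by simp, by simp [h], by simp [h]⟩
    · obtain ⟨j, hj, h1, h2⟩ := ih (s+1) p h
      exact ⟨j+1, by simpa using hj, by push_cast; omega, by simpa using h2⟩

-- ===== VERDICT (by name: the statement is the Claim_ definition above) =====
theorem merge_object_definitions_py_spec : Claim_equal_merge_object_definitions_py := by
  intro headers column_types otd _ hpre
  unfold Spec_merge_object_definitions_py
  unfold Pre_merge_object_definitions_py at hpre
  unfold merge_object_definitions_py merge_object_definitions_py_alt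
  simp only []
  set sliced := PySem.List.slice column_types none (some (headers.length : Int)) with hsl
  have hslice : sliced = column_types.take headers.length := by
    rw [hsl, PySem.List.slice_to_natCast]
  have hlen : sliced.length = headers.length := by
    rw [hslice, List.length_take]; omega
  set pairs := PySem.List.enumerate sliced 0 with hpairs
  -- the column type at each enumerated index
  have hcol : ∀ p ∈ pairs, PySem.List.pyGetD column_types p.1 "" = p.2 := by
    intro p hp
    obtain ⟨j, hj, h1, h2⟩ := pv_mem_enumerate sliced 0 p hp
    rw [hslice] at h2
    rw [List.getElem?_take] at h2
    have hjn : j < headers.length := by rwa [hlen] at hj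
    rw [if_pos hjn] at h2
    rw [h1]
    simp only [zero_add, PySem.List.pyGetD_natCast]
    rw [List.getD_eq_getElem?_getD, h2]
    rfl
  -- A's range loop is the loop over the enumerated pairs
  have hrange : PySem.List.pyRange 0 (headers.length : Int) = pairs.map (fun x => x.1) := by
    rw [hpairs, PySem.List.map_fst_enumerate, hlen]
    norm_num
  rw [hrange, List.foldl_map]
  rw [PySem.List.foldl_congr_mem _ _ (pvStepA headers otd) _ (by
    intro acc p hp
    unfold pvStepA
    rw [hcol p hp])]
  -- B's first loop is the pvStepB loop
  have hset : (PySem.Set.ofList ["map(object)", "object", "list(object)"] : PySem.Set String)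
      = ["map(object)", "object", "list(object)"] := by decide
  rw [PySem.List.foldl_congr_mem _ _ (pvStepB headers) _ (by
    intro acc p _
    unfold pvStepB
    rw [hset, PySem.Set.contains_eq_listContains])]
  set g := pairs.foldl (pvStepB headers) PySem.Dict.empty with hg
  have hgnd : g.keys.Nodup := pvFoldB_nodup headers pairs _ (by simp [PySem.Dict.keys, PySem.Dict.empty])
  have hgne : ∀ q ∈ g.items, q.2 ≠ [] := pvFoldB_nonnil headers pairs _ (by simp [PySem.Dict.empty])
  -- A's merged dict is the rendering of the index groups
  have hA : pairs.foldl (pvStepA headers otd) PySem.Dict.empty = pvRender otd g := by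
    have h0 : (PySem.Dict.empty : PySem.Dict String (PySem.Dict String String)) = pvRender otd PySem.Dict.empty := rfl
    rw [h0, pvMain headers otd pairs PySem.Dict.empty (by simp [PySem.Dict.keys, PySem.Dict.empty]) (by simp [PySem.Dict.empty])]
  rw [hA]
  -- B's second loop inserts each group's merged value at a fresh key
  have hB : (g.items.foldl
      (fun (m : PySem.Dict String (PySem.Dict String String)) q => m.insert q.1 (pvMval otd q.2))
      PySem.Dict.empty).items = (pvRender otd g).items := by
    rw [PySem.Dict.items_foldl_insert_fresh g.items (fun q => q.1) (fun q => pvMval otd q.2)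
      PySem.Dict.empty (fun a _ => rfl) hgnd]
    rfl
  exact congrArg (List.map (fun p : String × PySem.Dict String String => (p.1, p.2.items))) hB.symm
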